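-- pv_equiv track=rewrite | github.com/PetrPrazak/AdventOfCode | 2016/14/aoc_day14.py | has_repeating
-- ===== SOURCE A (Python) =====
-- def has_repeating(line, num, letter=None):
--     cur = None
--     count = 0
--     for c in line:
--         if c == cur and (not letter or c == letter):
--             count += 1
--             if count == num:
--                 return c
--         else:
--             cur = c
--             count = 1
--     return None
-- ===== SOURCE B (Python) =====
-- def has_repeating(line, num, letter=None):
--     # run-based scan: walk maximal runs of equal characters and test each run once
--     if num < 2:
--         return None
--     i, n = 0, len(line)
--     while i < n:
--         j = i
--         while j < n and line[j] == line[i]: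
--             j += 1
--         if (not letter or line[i] == letter) and j - i >= num:
--             return line[i]
--         i = j
--     return None
-- ===== Notes on version B (the rewrite author's own statement) =====
-- stated objective: alternative
-- what changed: Replaces the cur/count state machine with a run-grouping scan: an explicit num<2 guard, then advance over each maximal run of equal characters and return the run's character the first time a (letter-matching) run has length >= num.
import Mathlib
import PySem

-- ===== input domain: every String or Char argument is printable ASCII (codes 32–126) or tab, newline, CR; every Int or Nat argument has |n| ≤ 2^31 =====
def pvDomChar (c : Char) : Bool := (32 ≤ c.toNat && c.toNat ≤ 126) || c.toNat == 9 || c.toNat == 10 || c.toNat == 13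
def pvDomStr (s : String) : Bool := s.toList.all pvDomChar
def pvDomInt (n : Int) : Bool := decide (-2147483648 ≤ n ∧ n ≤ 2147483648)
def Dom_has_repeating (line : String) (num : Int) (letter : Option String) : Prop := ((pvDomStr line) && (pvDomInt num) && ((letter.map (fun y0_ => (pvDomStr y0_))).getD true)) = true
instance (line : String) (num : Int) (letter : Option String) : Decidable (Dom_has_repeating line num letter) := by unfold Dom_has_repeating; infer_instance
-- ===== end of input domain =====

-- B replaces A's cur/count state machine by a run-grouping scan (explicit num<2 guard, then
-- test each maximal run of equal characters once); alternative decomposition, same cost.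


-- ===== PORT A =====
-- A's for-loop with early return, as recursion over the characters with state (cur, count).
-- Python 'not letter' is true for None and ""; 'c == letter' compares the 1-char string to letter.
def hasRepGoA (num : Int) (letter : Option String) : List Char → Option Char → Int → Option String
  | [], _, _ => none
  | c :: rest, cur, count =>
    if cur = some c ∧ (letter = none ∨ letter = some "" ∨ letter = some (String.mk [c])) then
      if count + 1 = num then some (String.mk [c])
      else hasRepGoA num letter rest cur (count + 1)
    else hasRepGoA num letter rest (some c) 1

def has_repeating (line : String) (num : Int) (letter : Option String) : Option String :=
  hasRepGoA num letter line.toList none 0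

-- ===== PORT B =====
-- B's outer while loop, one step per maximal run: the inner 'while line[j] == line[i]' scan is
-- the takeWhile length, 'i = j' skips the run (dropWhile).
def hasRepGoB (num : Int) (letter : Option String) : List Char → Option String
  | [] => none
  | c :: rest =>
    if (letter = none ∨ letter = some "" ∨ letter = some (String.mk [c])) ∧
       num ≤ (1 + (rest.takeWhile (· == c)).length : Int) then
      some (String.mk [c])
    else hasRepGoB num letter (rest.dropWhile (· == c))
termination_by l => l.length
decreasing_by
  simp only [List.length_cons]
  exact Nat.lt_succ_of_le (List.length_dropWhile_le _ _)

def has_repeating_alt (line : String) (num : Int) (letter : Option String) : Option String :=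
  if num < 2 then none else hasRepGoB num letter line.toList

-- ===== PRECONDITION & SPEC =====
def Spec_has_repeating (line : String) (num : Int) (letter : Option String) (out : Option String) : Prop := out = has_repeating_alt line num letter
instance (line : String) (num : Int) (letter : Option String) (out : Option String) : Decidable (Spec_has_repeating line num letter out) := by unfold Spec_has_repeating; infer_instance

-- ===== CLAIM (what is proved, stated in full; the proofs are below) =====
def Claim_equal_has_repeating : Prop := ∀ (line : String) (num : Int) (letter : Option String), Dom_has_repeating line num letter → Spec_has_repeating line num letter (has_repeating line num letter)

-- ===== LEMMAS AND PROOFS =====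

-- When num < 2, A never returns: inside the loop count only reaches num after an increment
-- from count ≥ 1, i.e. at a value ≥ 2.
lemma goA_none_of_lt_two (num : Int) (letter : Option String) (hnum : num < 2) :
    ∀ (l : List Char) (cur : Option Char) (count : Int),
      (cur = none ∨ 1 ≤ count) → hasRepGoA num letter l cur count = none := by
  intro l
  induction l with
  | nil => intro cur count _; rfl
  | cons c rest ih =>
    intro cur count h
    simp only [hasRepGoA]
    split
    · rename_i hcond
      have hcount : 1 ≤ count := by
        rcases h with h | h
        · exact absurd (h ▸ hcond.1) (by simp)
        · exact h
      rw [if_neg (by omega)]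
      exact ih cur (count + 1) (Or.inr (by omega))
    · exact ih (some c) 1 (Or.inr (by omega))

-- Running A through a run of the character c (all of t equals c), starting with cur = some c.
lemma goA_run (num : Int) (letter : Option String) (c : Char) :
    ∀ (t : List Char) (r : List Char) (count : Int), (∀ x ∈ t, x = c) →
      hasRepGoA num letter (t ++ r) (some c) count =
        if (letter = none ∨ letter = some "" ∨ letter = some (String.mk [c])) then
          (if count < num ∧ num ≤ count + t.length then some (String.mk [c])
           else hasRepGoA num letter r (some c) (count + t.length))
        else hasRepGoA num letter r (some c) (if t.isEmpty then count else 1) := by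
  intro t
  induction t with
  | nil =>
    intro r count _
    simp only [List.nil_append, List.length_nil, List.isEmpty_nil, if_true]
    split
    · rw [if_neg (by omega)]; norm_num
    · rfl
  | cons x t' ih =>
    intro r count hall
    have hx : x = c := hall x (List.mem_cons_self)
    subst hx
    simp only [List.cons_append, hasRepGoA]
    by_cases hL : (letter = none ∨ letter = some "" ∨ letter = some (String.mk [x]))
    · rw [if_pos (show _ ∧ _ from ⟨by simp, hL⟩), if_pos hL]
      by_cases hret : count + 1 = num
      · rw [if_pos hret, if_pos (by simp only [List.length_cons]; omega)]
      · rw [if_neg hret, ih r (count + 1) (fun y hy => hall y (List.mem_cons_of_mem _ hy)),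
            if_pos hL]
        simp only [List.length_cons]
        by_cases h1 : count + 1 < num ∧ num ≤ count + 1 + (t'.length : Int)
        · rw [if_pos h1, if_pos (by omega)]
        · rw [if_neg h1, if_neg (by omega)]
          congr 1
          omega
    · rw [if_neg (by intro h; exact hL h.2), if_neg hL,
          ih r 1 (fun y hy => hall y (List.mem_cons_of_mem _ hy)), if_neg hL]
      simp only [List.isEmpty_cons, if_neg (by decide : ¬ (false = true))]
      split <;> rfl

-- The head of dropWhile fails the predicate.
lemma dropWhile_head_not (p : Char → Bool) :
    ∀ (l : List Char) (x : Char) (xs : List Char), l.dropWhile p = x :: xs → p x = false := by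
  intro l
  induction l with
  | nil => intro x xs h; simp at h
  | cons a l ih =>
    intro x xs h
    rw [List.dropWhile_cons] at h
    split at h
    · exact ih x xs h
    · cases h; simpa using ‹¬ p a = true›

-- A "fresh" state (the current character does not continue the previous run) equals B.
lemma goA_eq_goB (num : Int) (letter : Option String) (hnum : 2 ≤ num) :
    ∀ (l : List Char) (cur : Option Char) (count : Int),
      (∀ x rest, l = x :: rest → cur ≠ some x) →
      hasRepGoA num letter l cur count = hasRepGoB num letter l := by
  intro l
  generalize hn : l.length = n
  induction n using Nat.strong_induction_on generalizing l with
  | _ n ih =>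
    match l with
    | [] => intro cur count _; simp [hasRepGoA, hasRepGoB]
    | c :: rest =>
      subst hn
      intro cur count hfresh
      have hcur : ¬ (cur = some c ∧ (letter = none ∨ letter = some "" ∨ letter = some (String.mk [c]))) := by
        intro h; exact hfresh c rest rfl h.1
      have hallc : ∀ x ∈ rest.takeWhile (· == c), x = c := by
        intro x hx; simpa using List.mem_takeWhile_imp hx
      have hdroplen : (rest.dropWhile (· == c)).length < (c :: rest).length := by
        simp only [List.length_cons]
        exact Nat.lt_succ_of_le (List.length_dropWhile_le _ _)
      have hdropfresh : ∀ x xs, rest.dropWhile (· == c) = x :: xs → (some c : Option Char) ≠ some x := by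
        intro x xs hx heq
        have hpx := dropWhile_head_not (· == c) rest x xs hx
        cases heq
        simp at hpx
      simp only [hasRepGoA]
      rw [if_neg hcur, hasRepGoB]
      conv_lhs => rw [← List.takeWhile_append_dropWhile (p := (· == c)) (l := rest)]
      rw [goA_run num letter c _ _ 1 hallc]
      by_cases hL : (letter = none ∨ letter = some "" ∨ letter = some (String.mk [c]))
      · rw [if_pos hL]
        by_cases hlong : num ≤ (1 + ((rest.takeWhile (· == c)).length : Int))
        · rw [if_pos ⟨by omega, by omega⟩, if_pos ⟨hL, hlong⟩]
        · rw [if_neg (by omega), if_neg (by intro h; exact hlong h.2)]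
          exact ih _ hdroplen _ rfl _ _ hdropfresh
      · have h1 : (if (rest.takeWhile (· == c)).isEmpty then (1 : Int) else 1) = 1 := by
          split <;> rfl
        rw [if_neg hL, h1, if_neg (show ¬ _ from fun h => hL h.1)]
        exact ih _ hdroplen _ rfl _ _ hdropfresh

-- ===== VERDICT (by name: the statement is the Claim_ definition above) =====
theorem has_repeating_spec : Claim_equal_has_repeating := by
  intro line num letter _
  unfold Spec_has_repeating has_repeating has_repeating_alt
  by_cases hnum : num < 2
  · rw [if_pos hnum]
    exact goA_none_of_lt_two num letter hnum _ none 0 (Or.inl rfl)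
  · rw [if_neg hnum]
    exact goA_eq_goB num letter (by omega) _ none 0 (by intro x rest _; simp)
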